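-- pv_equiv track=rewrite | github.com/domsooch/PCRSim | src/Probe/MolBio.py | CodonForm
-- ===== SOURCE A (Python) =====
-- def CodonForm(seq):
--     i = 0
--     outseq = ''
--     for s in seq:
--         outseq = outseq+s
--         i+=1
--         if i ==3:
--             i = 0
--             outseq += ' '
--     return outseq
-- ===== SOURCE B (Python) =====
-- def CodonForm(seq):
--     parts = []
--     for i in range(0, len(seq), 3):
--         chunk = seq[i:i+3]
--         parts.append(chunk)
--         if len(chunk) == 3:
--             parts.append(' ')
--     return ''.join(parts)
-- ===== Notes on version B (the rewrite author's own statement) =====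
-- stated objective: idiomatic
-- what changed: Replaces the per-character loop with a modular counter by a block-wise traversal over 3-character slices, collecting pieces in a list joined once at the end.
import Mathlib
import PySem

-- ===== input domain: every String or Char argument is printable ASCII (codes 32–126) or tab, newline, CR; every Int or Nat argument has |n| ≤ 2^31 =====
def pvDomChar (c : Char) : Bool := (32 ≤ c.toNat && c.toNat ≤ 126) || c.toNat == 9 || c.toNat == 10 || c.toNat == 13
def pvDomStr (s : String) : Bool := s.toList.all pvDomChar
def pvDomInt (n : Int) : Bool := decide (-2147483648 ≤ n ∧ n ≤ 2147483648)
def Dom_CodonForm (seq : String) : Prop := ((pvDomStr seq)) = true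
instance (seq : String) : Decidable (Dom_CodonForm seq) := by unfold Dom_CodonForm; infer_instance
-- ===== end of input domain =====

-- B groups the sequence into 3-character slices joined once, instead of A's per-character loop with a modular counter; same return value, idiomatic decomposition.


-- ===== PORT A =====
-- step of A's for-loop: append the char, bump the counter, add a space after every 3rd char
def aStep (st : Int × List Char) (s : Char) : Int × List Char :=
  let outseq := st.2 ++ [s]
  let i := st.1 + 1
  if i == 3 then (0, outseq ++ [' ']) else (i, outseq)

def CodonForm (seq : String) : String :=
  String.ofList (seq.toList.foldl aStep ((0 : Int), [])).2

-- ===== PORT B =====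
-- block-wise: take the next 3-char chunk, append a space iff the chunk is full, recurse on the rest
def bGo : List Char → List Char
  | [] => []
  | c :: rest =>
    let chunk := (c :: rest).take 3
    chunk ++ (if chunk.length == 3 then [' '] else []) ++ bGo (rest.drop 2)
termination_by cs => cs.length
decreasing_by simp [List.length_drop]

def CodonForm_alt (seq : String) : String :=
  String.ofList (bGo seq.toList)

-- ===== PRECONDITION & SPEC =====
def Spec_CodonForm (seq : String) (out : String) : Prop := out = CodonForm_alt seq
instance (seq : String) (out : String) : Decidable (Spec_CodonForm seq out) := by unfold Spec_CodonForm; infer_instance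

-- ===== CLAIM (what is proved, stated in full; the proofs are below) =====
def Claim_equal_CodonForm : Prop := ∀ (seq : String), Dom_CodonForm seq → Spec_CodonForm seq (CodonForm seq)

-- ===== LEMMAS AND PROOFS =====
theorem key : ∀ (cs acc : List Char), (cs.foldl aStep ((0 : Int), acc)).2 = acc ++ bGo cs
  | [], acc => by rw [bGo]; simp
  | [a], acc => by rw [bGo]; simp [aStep]; rw [bGo]
  | [a, b], acc => by rw [bGo]; simp [aStep, bGo]
  | a :: b :: c :: rest, acc => by
    have ih := key rest (acc ++ [a, b, c, ' '])
    rw [bGo]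
    simp [aStep] at ih ⊢
    simpa using ih
termination_by cs _ => cs.length

-- ===== VERDICT (by name: the statement is the Claim_ definition above) =====
theorem CodonForm_spec : Claim_equal_CodonForm := by
  intro seq _
  unfold Spec_CodonForm CodonForm CodonForm_alt
  rw [key]
  simp
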